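-- pv_equiv track=rewrite | github.com/shkippppper/Codewars-6kyu-HollowTriangle_python | HollowTriangle.py | hollow_triangle
-- ===== SOURCE A (Python) =====
-- def hollow_triangle(n):
--     firstFloor = 1
--     length = int(2*n-1)
--     finalResult = 0
--     resultToPrint = []
--     spaceInBetween = 1
--     for x in range(n):
--         spaceBetweeen = int((length - firstFloor)/2)
--         if x < 1:
--             finalResult = "_"*spaceBetweeen + "#"*firstFloor + "_"*spaceBetweeen
--         elif x + 1 < n:
--             finalResult = "_"*spaceBetweeen + "#"*1+"_"*spaceInBetween+"#"*1 + "_"*spaceBetweeen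
--             spaceInBetween += 2
--         else:
--             finalResult = "#"*length
--         firstFloor +=2
--         resultToPrint.append(finalResult)
--     return resultToPrint
-- ===== SOURCE B (Python) =====
-- def hollow_triangle(n):
--     width = 2 * n - 1
--     center = n - 1
--     rows = []
--     for x in range(n):
--         if x == n - 1:
--             row = ['#'] * width
--         else:
--             row = ['_'] * width
--             row[center - x] = '#'
--             row[center + x] = '#'
--         rows.append(''.join(row))
--     return rows
-- ===== Notes on version B (the rewrite author's own statement) =====
-- stated objective: alternative
-- what changed: Replaces A's branch-and-concatenate row builder with running counters (firstFloor, spaceInBetween) and a division by a geometric canvas: each row starts blank and the two edge cells at columns center-x and center+x are plotted by index arithmetic (bottom row fully filled).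
import Mathlib
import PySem

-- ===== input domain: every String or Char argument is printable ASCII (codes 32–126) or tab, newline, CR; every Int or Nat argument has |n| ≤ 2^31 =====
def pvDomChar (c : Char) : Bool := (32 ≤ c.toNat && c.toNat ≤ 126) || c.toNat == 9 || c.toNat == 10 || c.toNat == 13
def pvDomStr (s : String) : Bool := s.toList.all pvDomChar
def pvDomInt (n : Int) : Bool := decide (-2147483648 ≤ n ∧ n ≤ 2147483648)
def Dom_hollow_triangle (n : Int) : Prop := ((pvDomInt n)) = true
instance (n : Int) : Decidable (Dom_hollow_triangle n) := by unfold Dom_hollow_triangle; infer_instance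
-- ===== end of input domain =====

-- B replaces A's branch-and-concatenate row builder (running counters) by a uniform
-- per-cell geometric predicate over a (row, column) grid; same cost, alternative structure.


-- ===== PORT A =====
-- "c"*k for a Python int k (k < 0 gives "", matched by toNat)
def repC (k : Int) (c : Char) : List Char := List.replicate k.toNat c

-- A's loop body; sb ports int((length - firstFloor)/2): Python float division then truncation,
-- exact as truncated integer division since inside the loop the numerator is even, nonnegative
-- and (on Dom) well below 2^53.
def stepA (n : Int) (st : Int × Int × List String) (x : Int) : Int × Int × List String :=
  let ff := st.1
  let sib := st.2.1
  let acc := st.2.2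
  let sb := ((2 * n - 1) - ff).tdiv 2
  if x < 1 then
    (ff + 2, sib, acc ++ [String.ofList (repC sb '_' ++ repC ff '#' ++ repC sb '_')])
  else if x + 1 < n then
    (ff + 2, sib + 2, acc ++ [String.ofList (repC sb '_' ++ repC 1 '#' ++ repC sib '_' ++ repC 1 '#' ++ repC sb '_')])
  else
    (ff + 2, sib, acc ++ [String.ofList (repC (2 * n - 1) '#')])

def hollow_triangle (n : Int) : List String :=
  ((PySem.List.pyRange 0 n 1).foldl (stepA n) (1, 1, [])).2.2

-- ===== PORT B =====
-- ['_'] * width / row[i] = '#' / ''.join(row); indices center-x, center+x are always in range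
def hollow_triangle_alt (n : Int) : List String :=
  let width := 2 * n - 1
  let center := n - 1
  (PySem.List.pyRange 0 n 1).map (fun x =>
    if x = n - 1 then String.ofList (List.replicate width.toNat '#')
    else String.ofList (PySem.List.pySetD
      (PySem.List.pySetD (List.replicate width.toNat '_') (center - x) '#')
      (center + x) '#'))

-- ===== PRECONDITION & SPEC =====
def Spec_hollow_triangle (n : Int) (out : List String) : Prop := out = hollow_triangle_alt n
instance (n : Int) (out : List String) : Decidable (Spec_hollow_triangle n out) := by unfold Spec_hollow_triangle; infer_instance

-- ===== CLAIM (what is proved, stated in full; the proofs are below) =====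
def Claim_equal_hollow_triangle : Prop := ∀ (n : Int), Dom_hollow_triangle n → Spec_hollow_triangle n (hollow_triangle n)

-- ===== LEMMAS AND PROOFS =====

-- the row A's loop appends at index x (for 0 ≤ x < n)
def rowA (n x : Int) : String :=
  if x < 1 then String.ofList (repC (n - 1) '_' ++ repC 1 '#' ++ repC (n - 1) '_')
  else if x + 1 < n then
    String.ofList (repC (n - 1 - x) '_' ++ repC 1 '#' ++ repC (2 * x - 1) '_' ++ repC 1 '#' ++ repC (n - 1 - x) '_')
  else String.ofList (repC (2 * n - 1) '#')

lemma tdiv_even (a : Int) : (2 * a).tdiv 2 = a :=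
  Int.mul_tdiv_cancel_left a (by norm_num)

lemma map_pyRange_const (f : Int → Char) (a b : Int) (c : Char)
    (h : ∀ x, a ≤ x → x < b → f x = c) :
    (PySem.List.pyRange a b 1).map f = List.replicate (b - a).toNat c := by
  rw [PySem.List.pyRange_one, List.map_map]
  rw [List.eq_replicate_iff]
  constructor
  · simp
  · intro y hy
    simp only [List.mem_map, List.mem_range] at hy
    obtain ⟨k, hk, rfl⟩ := hy
    show f (a + k) = c
    exact h _ (by omega) (by omega)

lemma map_pyRange_singleton (f : Int → Char) (a : Int) :
    (PySem.List.pyRange a (a + 1) 1).map f = [f a] := by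
  rw [PySem.List.pyRange_one_singleton]; rfl

lemma A_loop_aux (n : Int) : ∀ (k : Nat) (x0 : Int) (acc : List String),
    x0 = n - k → 0 ≤ x0 →
    ((PySem.List.pyRange x0 n 1).foldl (stepA n) (2 * x0 + 1, max 1 (2 * x0 - 1), acc)).2.2
      = acc ++ (PySem.List.pyRange x0 n 1).map (rowA n) := by
  intro k
  induction k with
  | zero =>
    intro x0 acc hx0 _
    rw [PySem.List.pyRange_one_eq_nil (by omega)]
    simp
  | succ k ih =>
    intro x0 acc hx0 h0
    rw [PySem.List.pyRange_one_cons (by omega)]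
    simp only [List.foldl_cons, List.map_cons]
    have hsb : ((2 * n - 1) - (2 * x0 + 1)).tdiv 2 = n - 1 - x0 := by
      have h2 : (2 * n - 1) - (2 * x0 + 1) = 2 * (n - 1 - x0) := by ring
      rw [h2, tdiv_even]
    by_cases hx1 : x0 < 1
    · -- first row: x0 = 0
      have hx00 : x0 = 0 := by omega
      have hstep : stepA n (2 * x0 + 1, max 1 (2 * x0 - 1), acc) x0
            = (2 * (x0 + 1) + 1, max 1 (2 * (x0 + 1) - 1), acc ++ [rowA n x0]) := by
        simp only [stepA, hsb, if_pos hx1, rowA]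
        subst hx00
        norm_num
      rw [hstep, ih (x0 + 1) (acc ++ [rowA n x0]) (by omega) (by omega)]
      simp
    · by_cases hx2 : x0 + 1 < n
      · -- middle row
        have hstep : stepA n (2 * x0 + 1, max 1 (2 * x0 - 1), acc) x0
              = (2 * (x0 + 1) + 1, max 1 (2 * (x0 + 1) - 1), acc ++ [rowA n x0]) := by
          simp only [stepA, hsb, if_neg hx1, if_pos hx2, rowA]
          have hm : max 1 (2 * x0 - 1) = 2 * x0 - 1 := by omega
          rw [hm]
          refine Prod.ext (by omega) (Prod.ext (by simp; omega) rfl)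
        rw [hstep, ih (x0 + 1) (acc ++ [rowA n x0]) (by omega) (by omega)]
        simp
      · -- last row: x0 + 1 = n, the remaining range is empty
        rw [PySem.List.pyRange_one_eq_nil (by omega)]
        simp only [List.foldl_nil, List.map_nil]
        simp [stepA, if_neg hx1, if_neg hx2, rowA]

lemma A_loop (n : Int) : hollow_triangle n = (PySem.List.pyRange 0 n 1).map (rowA n) := by
  by_cases hn : 0 < n
  · have h := A_loop_aux n n.toNat 0 [] (by omega) (by omega)
    simpa [hollow_triangle] using h
  · unfold hollow_triangle
    rw [PySem.List.pyRange_one_eq_nil (by omega)]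
    rfl

lemma row_eq (n x : Int) (hx0 : 0 ≤ x) (hxn : x < n) :
    rowA n x
      = String.ofList ((PySem.List.pyRange 0 (2 * n - 1) 1).map (fun c =>
          if c = (n - 1) - x ∨ c = (n - 1) + x ∨
             (x = n - 1 ∧ (n - 1) - x ≤ c ∧ c ≤ (n - 1) + x) then '#' else '_')) := by
  by_cases hlast : x = n - 1
  · -- bottom row (includes n = 1): every cell is '#'
    rw [map_pyRange_const _ _ _ '#' (fun c hc1 hc2 => by
      rw [if_pos]; exact Or.inr (Or.inr ⟨hlast, by omega, by omega⟩))]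
    unfold rowA
    by_cases hx1 : x < 1
    · have hn1 : n = 1 := by omega
      rw [if_pos hx1]
      subst hn1
      norm_num [repC]
    · rw [if_neg hx1, if_neg (by omega)]
      simp only [repC, Int.sub_zero]
  · have hmid : x + 1 < n := by omega
    by_cases hx1 : x < 1
    · -- top row: the two edge columns coincide (x = 0)
      have hx00 : x = 0 := by omega
      subst hx00
      rw [PySem.List.pyRange_one_append 0 (n - 1) (2 * n - 1) (by omega) (by omega),
          PySem.List.pyRange_one_append (n - 1) ((n - 1) + 1) (2 * n - 1) (by omega) (by omega)]
      simp only [List.map_append, map_pyRange_singleton]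
      rw [map_pyRange_const _ _ _ '_' (fun c hc1 hc2 => by
            rw [if_neg]; rintro (h | h | ⟨h, _, _⟩) <;> omega),
          map_pyRange_const _ _ _ '_' (fun c hc1 hc2 => by
            rw [if_neg]; rintro (h | h | ⟨h, _, _⟩) <;> omega)]
      rw [if_pos (Or.inl (by omega))]
      unfold rowA
      rw [if_pos (by norm_num)]
      simp only [repC, List.append_assoc, Int.toNat_one, List.replicate_one]
      rw [show (n - 1 - 0 : Int) = n - 1 by ring,
          show (2 * n - 1 - (n - 1 + 1) : Int) = n - 1 by ring]
    · -- middle row: two distinct edge columns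
      rw [PySem.List.pyRange_one_append 0 ((n - 1) - x) (2 * n - 1) (by omega) (by omega),
          PySem.List.pyRange_one_append ((n - 1) - x) (((n - 1) - x) + 1) (2 * n - 1) (by omega) (by omega),
          PySem.List.pyRange_one_append (((n - 1) - x) + 1) ((n - 1) + x) (2 * n - 1) (by omega) (by omega),
          PySem.List.pyRange_one_append ((n - 1) + x) (((n - 1) + x) + 1) (2 * n - 1) (by omega) (by omega)]
      simp only [List.map_append, map_pyRange_singleton]
      rw [map_pyRange_const _ _ _ '_' (fun c hc1 hc2 => by
            rw [if_neg]; rintro (h | h | ⟨h, _, _⟩) <;> omega),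
          map_pyRange_const _ _ _ '_' (fun c hc1 hc2 => by
            rw [if_neg]; rintro (h | h | ⟨h, _, _⟩) <;> omega),
          map_pyRange_const _ _ _ '_' (fun c hc1 hc2 => by
            rw [if_neg]; rintro (h | h | ⟨h, _, _⟩) <;> omega)]
      simp only [true_or, or_true, if_true]
      unfold rowA
      rw [if_neg hx1, if_pos hmid]
      simp only [repC, List.append_assoc, Int.toNat_one, List.replicate_one]
      rw [show (n - 1 - x - 0 : Int) = n - 1 - x by ring,
          show (n - 1 + x - (n - 1 - x + 1) : Int) = 2 * x - 1 by ring,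
          show (2 * n - 1 - (n - 1 + x + 1) : Int) = n - 1 - x by ring]

lemma alt_row_eq (n x : Int) (hx0 : 0 ≤ x) (hxn : x < n) :
    (if x = n - 1 then String.ofList (List.replicate (2 * n - 1).toNat '#')
     else String.ofList (PySem.List.pySetD
        (PySem.List.pySetD (List.replicate (2 * n - 1).toNat '_') ((n - 1) - x) '#')
        ((n - 1) + x) '#'))
      = String.ofList ((PySem.List.pyRange 0 (2 * n - 1) 1).map (fun c =>
          if c = (n - 1) - x ∨ c = (n - 1) + x ∨
             (x = n - 1 ∧ (n - 1) - x ≤ c ∧ c ≤ (n - 1) + x) then '#' else '_')) := by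
  by_cases hlast : x = n - 1
  · rw [if_pos hlast,
        map_pyRange_const _ _ _ '#' (fun c hc1 hc2 => by
          rw [if_pos]; exact Or.inr (Or.inr ⟨hlast, by omega, by omega⟩))]
    congr 2
    omega
  · rw [if_neg hlast]
    have hn2 : x + 1 < n := by omega
    have hW : (List.replicate (2 * n - 1).toNat '_').length = (2 * n - 1).toNat := by simp
    have hi1 : ((n - 1) - x : Int) = ((n - 1 - x).toNat : Int) := by omega
    have hi2 : ((n - 1) + x : Int) = ((n - 1 + x).toNat : Int) := by omega
    have h1 : PySem.List.pySetD (List.replicate (2 * n - 1).toNat '_') ((n - 1) - x) '#'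
        = (List.replicate (2 * n - 1).toNat '_').set (n - 1 - x).toNat '#' := by
      rw [hi1]
      unfold PySem.List.pySetD
      rw [PySem.List.pySet?_natCast _ _ _ (by rw [List.length_replicate]; omega), Option.getD_some, Int.toNat_natCast]
    have hlen1 : ((List.replicate (2 * n - 1).toNat '_').set (n - 1 - x).toNat '#').length
        = (2 * n - 1).toNat := by simp
    have h2 : PySem.List.pySetD
          ((List.replicate (2 * n - 1).toNat '_').set (n - 1 - x).toNat '#') ((n - 1) + x) '#'
        = ((List.replicate (2 * n - 1).toNat '_').set (n - 1 - x).toNat '#').set (n - 1 + x).toNat '#' := by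
      rw [hi2]
      unfold PySem.List.pySetD
      rw [PySem.List.pySet?_natCast _ _ _ (by rw [List.length_set, List.length_replicate]; omega), Option.getD_some, Int.toNat_natCast]
    rw [h1, h2]
    congr 1
    rw [PySem.List.pyRange_one, List.map_map]
    apply List.ext_getElem
    · simp
    · intro i hL hR
      simp only [List.getElem_set, List.getElem_replicate, List.getElem_map, List.getElem_range,
        Function.comp_apply, zero_add]
      have hi : i < (2 * n - 1).toNat := by simpa using hL
      split_ifs <;> first | rfl | (exfalso; omega)

theorem hollow_triangle_spec : Claim_equal_hollow_triangle := by
  intro n _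
  show hollow_triangle n = hollow_triangle_alt n
  rw [A_loop]
  unfold hollow_triangle_alt
  refine List.map_congr_left (fun x hx => ?_)
  rw [PySem.List.mem_pyRange_one] at hx
  rw [row_eq n x hx.1 hx.2]
  exact (alt_row_eq n x hx.1 hx.2).symm
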